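-- pv_equiv track=rewrite | github.com/ridhohafidz/Learn-Python | learn-python/UTS/uts.py | hurufvokal
-- ===== SOURCE A (Python) =====
-- def hurufvokal( a='BNDG CKP' , b='AIUEOaiueo'): #parameter 1 parameter 2 dibuat menjadi variabel a dan b
--     total = 0 # untuk menampung nilai jika parameter pertama memiliki huruf vokal
--     teks1=len(a) #menghitung panjang string variabel a
--     teks2=len(b) #menghitung panjang string variabel b
--
--     for i in range(0, teks1): #banyaknya perulangan tergantung dari panjangnya parameter pertama
--         for j in range(0, teks2): #banyaknya perulangan tergantung dari panjangnya parameter kedua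
--             if a[i]  == b[j] : #jika parameter pertama sama dengan parameter kedua maka tambahkan value dari variabel total
--                 total += 1 #mengubah value sebelumnya
--             else :
--                 pass #lewati jika kondisi false
--     return total #mengembalikan nilai total
-- ===== SOURCE B (Python) =====
-- def hurufvokal(a='BNDG CKP', b='AIUEOaiueo'):
--     ca = {}
--     for c in a:
--         ca[c] = ca.get(c, 0) + 1
--     cb = {}
--     for c in b:
--         cb[c] = cb.get(c, 0) + 1
--     total = 0
--     for c, n in ca.items():
--         total += n * cb.get(c, 0)
--     return total
-- ===== Notes on version B (the rewrite author's own statement) =====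
-- stated objective: faster
-- what changed: Replaces the nested all-pairs index scan with two frequency tables built in one pass each, then a single pass over a's distinct characters summing count_a(c)*count_b(c).
import Mathlib
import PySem

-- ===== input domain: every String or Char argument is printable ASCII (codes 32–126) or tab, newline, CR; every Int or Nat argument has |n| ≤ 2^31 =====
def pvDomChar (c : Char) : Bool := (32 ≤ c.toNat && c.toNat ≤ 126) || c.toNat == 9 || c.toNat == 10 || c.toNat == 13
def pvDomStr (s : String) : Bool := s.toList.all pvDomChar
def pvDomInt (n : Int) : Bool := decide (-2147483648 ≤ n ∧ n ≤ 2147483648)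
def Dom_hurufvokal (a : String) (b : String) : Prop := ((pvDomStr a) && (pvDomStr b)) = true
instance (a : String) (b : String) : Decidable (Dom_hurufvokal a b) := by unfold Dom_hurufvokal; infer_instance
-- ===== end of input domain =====

-- B replaces A's nested all-pairs index scan by two one-pass frequency tables and a
-- single pass over a's distinct characters summing count_a(c)*count_b(c) (objective: faster).

-- ===== PORT A =====
-- nested loops over range(len(a)) x range(len(b)); a[i]/b[j] are always in range,
-- so pyGetD with a dummy default is exact here
def hurufvokal (a : String) (b : String) : Int :=
  let teks1 : Int := PySem.Str.len a
  let teks2 : Int := PySem.Str.len b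
  (PySem.List.pyRange 0 teks1 1).foldl (fun total i =>
    (PySem.List.pyRange 0 teks2 1).foldl (fun t j =>
      if PySem.List.pyGetD a.toList i ' ' = PySem.List.pyGetD b.toList j ' ' then t + 1
      else t) total) 0

-- ===== PORT B =====
def hurufvokal_alt (a : String) (b : String) : Int :=
  let ca : PySem.Dict Char Int :=
    a.toList.foldl (fun d c => d.insert c (d.getD c 0 + 1)) PySem.Dict.empty
  let cb : PySem.Dict Char Int :=
    b.toList.foldl (fun d c => d.insert c (d.getD c 0 + 1)) PySem.Dict.empty
  ca.items.foldl (fun total kv => total + kv.2 * cb.getD kv.1 0) 0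

-- ===== PRECONDITION & SPEC =====
def Spec_hurufvokal (a : String) (b : String) (out : Int) : Prop := out = hurufvokal_alt a b
instance (a : String) (b : String) (out : Int) : Decidable (Spec_hurufvokal a b out) := by unfold Spec_hurufvokal; infer_instance

-- ===== CLAIM (what is proved, stated in full; the proofs are below) =====
def Claim_equal_hurufvokal : Prop := ∀ (a : String) (b : String), Dom_hurufvokal a b → Spec_hurufvokal a b (hurufvokal a b)

-- ===== LEMMAS AND PROOFS =====

-- sum of an indicator map vanishes when the pivot is absent
theorem sum_map_ite_not_mem (g : Char → Int) (x : Char) (s : List Char) (hx : x ∉ s) :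
    (s.map (fun k => if k = x then g k else 0)).sum = 0 := by
  induction s with
  | nil => simp
  | cons y ys ih =>
    simp only [List.map_cons, List.sum_cons]
    rw [if_neg (by rintro rfl; exact hx (List.mem_cons_self)),
        ih (fun h => hx (List.mem_cons_of_mem _ h))]
    ring

-- sum of an indicator map over a nodup list containing the pivot picks out g x
theorem sum_map_ite_nodup (g : Char → Int) (x : Char) (s : List Char)
    (hnd : s.Nodup) (hx : x ∈ s) :
    (s.map (fun k => if k = x then g k else 0)).sum = g x := by
  induction s with
  | nil => cases hx
  | cons y ys ih =>
    simp only [List.map_cons, List.sum_cons]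
    rcases List.mem_cons.mp hx with h | h
    · rw [if_pos h.symm, sum_map_ite_not_mem g x ys (h ▸ (List.nodup_cons.mp hnd).1), h]
      ring
    · rw [if_neg (by rintro rfl; exact (List.nodup_cons.mp hnd).1 h),
          ih (List.nodup_cons.mp hnd).2 h]
      ring

-- grouping: a sum over a list equals the count-weighted sum over any nodup superset of its elements
theorem sum_group (f : Char → Int) (la s : List Char)
    (hnd : s.Nodup) (hsub : ∀ x ∈ la, x ∈ s) :
    (la.map f).sum = (s.map (fun k => (la.count k : Int) * f k)).sum := by
  induction la with
  | nil => simp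
  | cons x t ih =>
    have hx : x ∈ s := hsub x List.mem_cons_self
    have hsub' : ∀ y ∈ t, y ∈ s := fun y hy => hsub y (List.mem_cons_of_mem _ hy)
    have hsplit : ∀ k : Char, ((x :: t).count k : Int) * f k
        = (t.count k : Int) * f k + (if k = x then f k else 0) := by
      intro k
      by_cases hk : k = x
      · subst hk; simp; ring
      · have hbk : (x == k) = false := beq_eq_false_iff_ne.mpr (fun e => hk e.symm)
        simp [List.count_cons, hk, hbk]
    calc ((x :: t).map f).sum
        = f x + (t.map f).sum := by simp
      _ = f x + (s.map (fun k => (t.count k : Int) * f k)).sum := by rw [ih hsub']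
      _ = (s.map (fun k => (t.count k : Int) * f k)).sum
            + (s.map (fun k => if k = x then f k else 0)).sum := by
            rw [sum_map_ite_nodup f x s hnd hx]; ring
      _ = (s.map (fun k => ((x :: t).count k : Int) * f k)).sum := by
            have hmap : s.map (fun k => ((x :: t).count k : Int) * f k)
                = s.map (fun k => (t.count k : Int) * f k + (if k = x then f k else 0)) :=
              List.map_congr_left (fun k _ => hsplit k)
            rw [hmap, PySem.List.sum_map_add_int]

-- A's nested loop computes sum over chars of a of (count of that char in b)
theorem hurufvokal_eq_sum (a b : String) :
    hurufvokal a b = (a.toList.map (fun c => (b.toList.count c : Int))).sum := by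
  unfold hurufvokal
  simp only [PySem.Str.len_eq]
  rw [PySem.List.foldl_pyRange_zero_pyGetD' a.toList ' '
      (f := fun total c =>
        (PySem.List.pyRange 0 (b.toList.length : Int) 1).foldl (fun t j =>
          if c = PySem.List.pyGetD b.toList j ' ' then t + 1 else t) total) 0]
  have h1 : a.toList.foldl (fun total c =>
        (PySem.List.pyRange 0 (b.toList.length : Int) 1).foldl (fun t j =>
          if c = PySem.List.pyGetD b.toList j ' ' then t + 1 else t) total) 0
      = a.toList.foldl (fun total c => total + (b.toList.count c : Int)) 0 := by
    apply PySem.List.foldl_congr_mem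
    intro acc c _
    rw [PySem.List.foldl_pyRange_zero_pyGetD' b.toList ' '
        (f := fun t d => if c = d then t + 1 else t) acc]
    rw [PySem.List.foldl_ite_add_one (p := fun d => c = d)]
    congr 2
    apply List.countP_congr
    intro d _
    rcases eq_or_ne c d with h | h
    · subst h; simp
    · simp [h, Ne.symm h]
  rw [h1, PySem.List.foldl_add]
  ring

-- B computes the count-weighted sum over a's distinct characters
theorem hurufvokal_alt_eq_sum (a b : String) :
    hurufvokal_alt a b
      = ((PySem.Set.ofList a.toList).map
          (fun k => (a.toList.count k : Int) * (b.toList.count k : Int))).sum := by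
  show (PySem.Dict.counter a.toList).items.foldl
      (fun total kv => total + kv.2 * (PySem.Dict.counter b.toList).getD kv.1 0) 0 = _
  rw [PySem.List.foldl_add (g := fun kv : Char × Int =>
        kv.2 * (PySem.Dict.counter b.toList).getD kv.1 0)]
  rw [PySem.Dict.items_counter, List.map_map]
  simp only [Function.comp_def, PySem.Dict.getD_counter, zero_add]

-- ===== VERDICT (by name: the statement is the Claim_ definition above) =====
theorem hurufvokal_spec : Claim_equal_hurufvokal := by
  intro a b _
  unfold Spec_hurufvokal
  rw [hurufvokal_eq_sum, hurufvokal_alt_eq_sum]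
  exact sum_group (fun c => (b.toList.count c : Int)) a.toList (PySem.Set.ofList a.toList)
    (PySem.Set.nodup_ofList a.toList)
    (fun x hx => (PySem.Set.mem_ofList _ _).mpr hx)
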